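-- pv_equiv track=rewrite | github.com/sagemath/sagetrac-mirror | src/sage/combinat/posets/lattices.py | _log_2
-- ===== SOURCE A (Python) =====
-- def _log_2(n):
--     """
--     Return the 2-based logarithm of `n` rounded up.
--
--     `n` is assumed to be a positive integer.
--
--     EXAMPLES::
--
--         sage: sage.combinat.posets.lattices._log_2(10)
--         4
--
--     TESTS::
--
--         sage: sage.combinat.posets.lattices._log_2(15)
--         4
--         sage: sage.combinat.posets.lattices._log_2(16)
--         4
--         sage: sage.combinat.posets.lattices._log_2(17)
--         5
--     """
--     bits = -1
--     i = n
--     while i: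
--         i = i >> 1
--         bits += 1
--     if 1 << bits == n:
--         return bits
--     return bits+1
-- ===== SOURCE B (Python) =====
-- def _log_2(n):
--     return (n - 1).bit_length()
-- ===== Notes on version B (the rewrite author's own statement) =====
-- stated objective: simpler
-- what changed: Replaces the hand-written shift-and-count loop plus power-of-two correction with the single closed-form expression (n-1).bit_length(), which equals ceil(log2(n)) for every positive n.
-- outside the precondition, e.g. on _log_2(0): A raises ValueError, B returns 1
import Mathlib
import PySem

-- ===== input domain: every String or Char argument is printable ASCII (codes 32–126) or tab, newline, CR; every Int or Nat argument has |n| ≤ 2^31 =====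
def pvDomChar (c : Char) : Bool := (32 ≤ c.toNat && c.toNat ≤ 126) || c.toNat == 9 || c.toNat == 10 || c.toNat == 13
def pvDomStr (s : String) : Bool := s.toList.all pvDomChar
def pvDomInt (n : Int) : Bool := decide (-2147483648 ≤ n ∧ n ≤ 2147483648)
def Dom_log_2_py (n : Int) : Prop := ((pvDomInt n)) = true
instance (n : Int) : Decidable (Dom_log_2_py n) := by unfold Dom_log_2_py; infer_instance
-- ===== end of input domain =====

-- B replaces A's shift-and-count loop (plus power-of-two correction) with the
-- closed form (n-1).bit_length(); objective: simpler.


-- ===== PORT A =====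
-- the `while i:` loop; the `0 < i` guard only makes the recursion total:
-- for i = 0 it agrees with Python, and for i < 0 Python diverges (excluded by Pre_)
def bitsLoopA (i : Int) (bits : Int) : Int :=
  if h : 0 < i then bitsLoopA (PySem.Int.floordiv i 2) (bits + 1) else bits
termination_by i.toNat
decreasing_by
  have h2 : PySem.Int.floordiv i 2 = i / 2 := PySem.Int.floordiv_eq_ediv_of_pos (by omega)
  rw [h2]; omega

-- `1 << bits` ported as 2 ^ bits.toNat: inside Pre_ (n ≥ 1) bits ≥ 0 always holds;
-- Python raises ValueError on a negative shift (n = 0, outside Pre_)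
def log_2_py (n : Int) : Int :=
  let bits := bitsLoopA n (-1)
  if (2 : Int) ^ bits.toNat = n then bits else bits + 1

-- ===== PORT B =====
def log_2_py_alt (n : Int) : Int := (PySem.Int.bitLength (n - 1) : Int)

-- ===== PRECONDITION & SPEC =====
-- Pre_ excludes n ≤ 0: A raises ValueError at n = 0 and loops forever for n < 0.
def Pre_log_2_py (n : Int) : Prop := 1 ≤ n
instance (n : Int) : Decidable (Pre_log_2_py n) := by unfold Pre_log_2_py; infer_instance
def pvWitness_log_2_py : Int := (10)

def Spec_log_2_py (n : Int) (out : Int) : Prop := out = log_2_py_alt n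
instance (n : Int) (out : Int) : Decidable (Spec_log_2_py n out) := by unfold Spec_log_2_py; infer_instance

-- ===== CLAIM (what is proved, stated in full; the proofs are below) =====
def Claim_equal_log_2_py : Prop := ∀ (n : Int), Dom_log_2_py n → Pre_log_2_py n → Spec_log_2_py n (log_2_py n)

-- ===== LEMMAS AND PROOFS =====

-- A's loop adds the bit length of its (positive) argument to the accumulator
theorem bitsLoopA_eq (m : Nat) (hm : 0 < m) :
    ∀ b : Int, bitsLoopA (m : Int) b = b + (PySem.Int.bitLength (m : Int) : Int) := by
  induction m using Nat.strong_induction_on with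
  | _ m ih =>
    intro b
    rw [bitsLoopA]
    have hpos : (0 : Int) < (m : Int) := by exact_mod_cast hm
    rw [dif_pos hpos]
    have hfd : PySem.Int.floordiv (m : Int) 2 = ((m / 2 : Nat) : Int) := by
      exact_mod_cast PySem.Int.floordiv_natCast m 2
    rw [hfd, PySem.Int.bitLength_natCast hm]
    by_cases h2 : m / 2 = 0
    · rw [h2]
      rw [bitsLoopA]
      simp [PySem.Int.bitLength_zero]
    · rw [ih (m / 2) (Nat.div_lt_self hm (by omega)) (Nat.pos_of_ne_zero h2)]
      push_cast; ring

-- uniqueness of the bit length from its two-sided power bounds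
theorem bitLength_eq_of (m k : Nat) (hk : 1 ≤ k)
    (h1 : 2 ^ (k - 1) ≤ m) (h2 : m < 2 ^ k) :
    PySem.Int.bitLength (m : Int) = k := by
  have hm : 0 < m := by have := Nat.one_le_two_pow (n := k - 1); omega
  set L := PySem.Int.bitLength (m : Int) with hL
  have hlt : m < 2 ^ L := by
    have := PySem.Int.lt_two_pow_bitLength (m : Int)
    simpa using this
  have hle : 2 ^ (L - 1) ≤ m := by
    have := PySem.Int.two_pow_bitLength_le (m : Int) (by exact_mod_cast hm.ne')
    simpa using this
  have hLpos : 1 ≤ L := by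
    by_contra h
    have : L = 0 := by omega
    rw [this] at hlt
    omega
  -- L ≤ k and k ≤ L from the nested bounds
  have h1' : L - 1 < k := by
    have : (2:Nat) ^ (L - 1) < 2 ^ k := lt_of_le_of_lt hle h2
    exact (Nat.pow_lt_pow_iff_right (by omega)).mp this
  have h2' : k - 1 < L := by
    have : (2:Nat) ^ (k - 1) < 2 ^ L := lt_of_le_of_lt h1 hlt
    exact (Nat.pow_lt_pow_iff_right (by omega)).mp this
  omega

-- ===== VERDICT (by name: the statement is the Claim_ definition above) =====
theorem log_2_py_spec : Claim_equal_log_2_py := by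
  intro n _ hpre
  unfold Pre_log_2_py at hpre
  unfold Spec_log_2_py log_2_py log_2_py_alt
  obtain ⟨m, rfl⟩ : ∃ m : Nat, n = (m : Int) := ⟨n.toNat, by omega⟩
  have hm : 0 < m := by exact_mod_cast hpre
  rw [bitsLoopA_eq m hm (-1)]
  set L := PySem.Int.bitLength (m : Int) with hL
  have hlt : m < 2 ^ L := by simpa using PySem.Int.lt_two_pow_bitLength (m : Int)
  have hle : 2 ^ (L - 1) ≤ m := by
    simpa using PySem.Int.two_pow_bitLength_le (m : Int) (by exact_mod_cast hm.ne')
  have hLpos : 1 ≤ L := by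
    by_contra h
    have : L = 0 := by omega
    rw [this] at hlt; omega
  have htn : (-1 + (L : Int)).toNat = L - 1 := by omega
  have hcast : ((m : Int) - 1) = ((m - 1 : Nat) : Int) := by omega
  show (if (2:Int) ^ (-1 + (L : Int)).toNat = (m : Int) then (-1 + (L : Int)) else (-1 + (L : Int)) + 1) = (PySem.Int.bitLength ((m : Int) - 1) : Int)
  rw [htn, hcast]
  by_cases hpow : (2 : Int) ^ (L - 1) = (m : Int)
  · rw [if_pos hpow]
    have hpowN : 2 ^ (L - 1) = m := by exact_mod_cast hpow
    by_cases hL1 : L = 1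
    · have : m = 1 := by rw [hL1] at hpowN; simpa using hpowN.symm
      subst this; rw [hL1]
      simp [PySem.Int.bitLength_zero]
    · have hL2 : 2 ≤ L := by omega
      have : PySem.Int.bitLength ((m - 1 : Nat) : Int) = L - 1 := by
        apply bitLength_eq_of _ _ (by omega)
        · have : 2 ^ (L - 1 - 1) * 2 = 2 ^ (L - 1) := by
            rw [← pow_succ]; congr 1; omega
          omega
        · omega
      rw [this]; omega
  · rw [if_neg hpow]
    have hne : 2 ^ (L - 1) ≠ m := by
      intro h; exact hpow (by exact_mod_cast h)
    have : PySem.Int.bitLength ((m - 1 : Nat) : Int) = L := by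
      apply bitLength_eq_of _ _ hLpos
      · omega
      · omega
    rw [this]; omega
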